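-- pv_equiv track=rewrite | github.com/quantonium/ila | src/ila/ilactl/utility.py | make_sub_addr
-- ===== SOURCE A (Python) =====
-- def make_sub_addr(number, blocks):
-- 	s = ""
-- 	for i in range(0, blocks):
-- 		v = (number >> (((blocks - 1 - i) * 16))) & 0xffff
-- 		s += "%x" %  v
-- 		if (i != blocks - 1):
-- 			s += ":"
--
-- 	return s
-- ===== SOURCE B (Python) =====
-- def make_sub_addr(number, blocks):
-- 	# Build the blocks back-to-front: peel 16 bits at a time from the low
-- 	# end, reverse the collected parts and join them with ':'.
-- 	parts = []
-- 	n = number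
-- 	for _ in range(blocks):
-- 		parts.append("%x" % (n & 0xffff))
-- 		n >>= 16
-- 	parts.reverse()
-- 	return ":".join(parts)
-- ===== Notes on version B (the rewrite author's own statement) =====
-- stated objective: alternative
-- what changed: B peels 16 bits at a time from the low end with a running right-shift, collects the block strings in a list and joins the reversed list with ':', instead of A's indexed big shifts per block and in-loop string concatenation with a conditional separator.
import Mathlib
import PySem

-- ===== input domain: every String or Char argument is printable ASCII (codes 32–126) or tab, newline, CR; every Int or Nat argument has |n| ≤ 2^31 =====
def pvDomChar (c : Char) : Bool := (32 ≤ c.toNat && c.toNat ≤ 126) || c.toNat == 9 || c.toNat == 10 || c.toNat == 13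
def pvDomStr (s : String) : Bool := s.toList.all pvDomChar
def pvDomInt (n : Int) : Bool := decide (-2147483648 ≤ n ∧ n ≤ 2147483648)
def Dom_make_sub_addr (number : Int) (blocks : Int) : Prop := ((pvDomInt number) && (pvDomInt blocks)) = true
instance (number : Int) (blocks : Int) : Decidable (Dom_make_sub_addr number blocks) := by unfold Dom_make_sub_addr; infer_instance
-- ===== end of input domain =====

-- B builds the blocks back-to-front (peel 16 low bits at a time, join the
-- reversed parts) instead of A's indexed big shifts with conditional ':'
-- appends; objective: alternative decomposition, same cost.

-- shared helper: Python "%x" % v for v ≥ 0 (lowercase hex, no padding);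
-- both Pythons call this same builtin, so both ports share it.
def hexDigit (n : Nat) : Char := if n < 10 then Char.ofNat (48 + n) else Char.ofNat (87 + n)

def hexNat (n : Nat) : List Char :=
  if h : n < 16 then [hexDigit n] else hexNat (n / 16) ++ [hexDigit (n % 16)]
decreasing_by exact Nat.div_lt_self (by omega) (by omega)

def pyHex (v : Int) : String := String.mk (hexNat v.toNat)

-- ===== PORT A =====
-- shift count (blocks - 1 - i) * 16 is ≥ 0 for every i in range(0, blocks),
-- so .toNat is exact here (Python would raise on a negative shift).
def make_sub_addr (number : Int) (blocks : Int) : String :=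
  (PySem.List.pyRange 0 blocks 1).foldl
    (fun s i =>
      let v : Int := PySem.Int.band (number >>> (((blocks - 1 - i) * 16)).toNat) 0xffff
      let s' := s ++ pyHex v
      if i ≠ blocks - 1 then s' ++ ":" else s')
    ""

-- ===== PORT B =====
-- B's loop appends to `parts` and B then reverses it; the port conses in
-- the loop, which builds exactly that reversed list, so the state already
-- holds `reversed(parts)` when it is joined.
def make_sub_addr_alt (number : Int) (blocks : Int) : String :=
  PySem.Str.join ":"
    ((PySem.List.pyRange 0 blocks 1).foldl
      (fun (st : List String × Int) _ => (pyHex (PySem.Int.band st.2 0xffff) :: st.1, st.2 >>> (16 : Nat)))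
      ([], number)).1

-- ===== PRECONDITION & SPEC =====
def Spec_make_sub_addr (number : Int) (blocks : Int) (out : String) : Prop := out = make_sub_addr_alt number blocks
instance (number : Int) (blocks : Int) (out : String) : Decidable (Spec_make_sub_addr number blocks out) := by unfold Spec_make_sub_addr; infer_instance

-- ===== CLAIM (what is proved, stated in full; the proofs are below) =====
def Claim_equal_make_sub_addr : Prop := ∀ (number : Int) (blocks : Int), Dom_make_sub_addr number blocks → Spec_make_sub_addr number blocks (make_sub_addr number blocks)

-- ===== LEMMAS AND PROOFS =====

-- B's low-to-high block list, in the order B's loop produces it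
def lowBlocks (n : Int) : Nat → List String
  | 0 => []
  | k + 1 => pyHex (PySem.Int.band n 0xffff) :: lowBlocks (n >>> (16 : Nat)) k

theorem str_join_nil : PySem.Str.join ":" [] = "" := by
  apply String.ext
  simp [PySem.Str.toList_join, PySem.Chars.join_nil]

theorem str_join_singleton (x : String) : PySem.Str.join ":" [x] = x := by
  apply String.ext
  simp [PySem.Str.toList_join, PySem.Chars.join_singleton]

theorem str_join_cons_cons (x y : String) (t : List String) :
    PySem.Str.join ":" (x :: y :: t) = x ++ ":" ++ PySem.Str.join ":" (y :: t) := by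
  apply String.ext
  simp [PySem.Str.toList_join, PySem.Chars.join_cons_cons]

theorem empty_append_str (s : String) : "" ++ s = s := by
  apply String.ext
  simp

theorem length_lowBlocks (n : Int) (k : Nat) : (lowBlocks n k).length = k := by
  induction k generalizing n with
  | zero => simp [lowBlocks]
  | succ k ih => simp [lowBlocks, ih]

theorem getElem_lowBlocks (n : Int) (k j : Nat) (hj : j < k) :
    (lowBlocks n k)[j]'(by rw [length_lowBlocks]; exact hj)
      = pyHex (PySem.Int.band (n >>> (16 * j)) 0xffff) := by
  induction k generalizing n j with
  | zero => omega
  | succ k ih =>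
    cases j with
    | zero => simp [lowBlocks, Int.shiftRight_zero]
    | succ j =>
      simp only [lowBlocks, List.getElem_cons_succ]
      rw [ih _ _ (by omega)]
      have h16 : 16 * (j + 1) = 16 + 16 * j := by ring
      rw [h16, Int.shiftRight_add]

theorem bFold (l : List Int) (p : List String) (n : Int) :
    (l.foldl (fun (st : List String × Int) _ => (pyHex (PySem.Int.band st.2 0xffff) :: st.1, st.2 >>> (16 : Nat))) (p, n)).1
      = (lowBlocks n l.length).reverse ++ p := by
  induction l generalizing p n with
  | nil => simp [lowBlocks]
  | cons x t ih =>
    simp only [List.foldl_cons, List.length_cons, lowBlocks]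
    rw [ih]
    simp

-- A's fold equals a ':'-join of the per-index block strings
theorem aFold (number blocks : Int) (k : Nat) : ∀ (a : Int) (s : String),
    (blocks - a).toNat = k →
    (PySem.List.pyRange a blocks 1).foldl
      (fun s i =>
        let v : Int := PySem.Int.band (number >>> (((blocks - 1 - i) * 16)).toNat) 0xffff
        let s' := s ++ pyHex v
        if i ≠ blocks - 1 then s' ++ ":" else s') s
    = s ++ PySem.Str.join ":" ((PySem.List.pyRange a blocks 1).map
        (fun i => pyHex (PySem.Int.band (number >>> (((blocks - 1 - i) * 16)).toNat) 0xffff))) := by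
  induction k with
  | zero =>
    intro a s h
    have hba : blocks ≤ a := by omega
    rw [PySem.List.pyRange_one_eq_nil hba]
    simp [str_join_nil]
  | succ k ih =>
    intro a s h
    have hab : a < blocks := by omega
    rw [PySem.List.pyRange_one_cons hab]
    simp only [List.foldl_cons, List.map_cons]
    by_cases ha : a = blocks - 1
    · have hnil : PySem.List.pyRange (a + 1) blocks 1 = [] :=
        PySem.List.pyRange_one_eq_nil (by omega)
      rw [hnil]
      simp [ha, str_join_singleton]
    · have hab2 : a + 1 < blocks := by omega
      rw [ih (a + 1) _ (by omega)]
      rw [PySem.List.pyRange_one_cons hab2]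
      simp only [List.map_cons]
      rw [str_join_cons_cons]
      simp [ha, String.append_assoc]

theorem lists_eq (number blocks : Int) :
    (PySem.List.pyRange 0 blocks 1).map
        (fun i => pyHex (PySem.Int.band (number >>> (((blocks - 1 - i) * 16)).toNat) 0xffff))
      = (lowBlocks number blocks.toNat).reverse := by
  rw [PySem.List.pyRange_one]
  apply List.ext_getElem
  · simp [length_lowBlocks]
  · intro i h1 h2
    simp only [List.length_map, List.length_range] at h1
    rw [List.getElem_map, List.getElem_map, List.getElem_range, List.getElem_reverse,
      getElem_lowBlocks _ _ _ (by simp [length_lowBlocks]; omega)]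
    have harg : (((blocks - 1 - (0 + (i : Int))) * 16)).toNat
        = 16 * ((lowBlocks number blocks.toNat).length - 1 - i) := by
      rw [length_lowBlocks]
      omega
    rw [harg]

-- ===== VERDICT (by name: the statement is the Claim_ definition above) =====
theorem make_sub_addr_spec : Claim_equal_make_sub_addr := by
  intro number blocks _
  unfold Spec_make_sub_addr make_sub_addr make_sub_addr_alt
  rw [aFold number blocks (blocks - 0).toNat 0 "" rfl, bFold, List.append_nil]
  have hl : (PySem.List.pyRange 0 blocks 1).length = blocks.toNat := by
    rw [PySem.List.length_pyRange_one]; norm_num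
  rw [hl, lists_eq, empty_append_str]
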